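-- pv_equiv track=rewrite | github.com/Lammatian/AdventOfCode | 2017/src/day09/main.py | part1
-- ===== SOURCE A (Python) =====
-- def part1(inp):
--     new_inp = inp
--     ignore_next = False
--     while '!' in new_inp:
--         inp = new_inp
--         new_inp = ''
--         for c in inp:
--             if ignore_next:
--                 ignore_next = False
--                 continue
--             if c == '!':
--                 ignore_next = True
--                 continue
--             new_inp += c
--
--     inp = new_inp
--     new_inp = ''
--     in_garbage = False
--     for c in inp:
--         if in_garbage:
--             if c == '>':
--                 in_garbage = False
--                 continue
--         else:
--             if c == '<':
--                 in_garbage = True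
--                 continue
--             new_inp += c
--
--     new_inp = new_inp.replace(',','')
--     def sum_groups(clean):
--         level = 0
--         result = 0
--         for c in clean:
--             if c == '{':
--                 level += 1
--             elif c == '}':
--                 result += level
--                 level -= 1
--         return result
--     return sum_groups(new_inp)
-- ===== SOURCE B (Python) =====
-- def part1(inp):
--     escape = False
--     in_garbage = False
--     level = 0
--     result = 0
--     for c in inp:
--         if escape:
--             escape = False
--         elif c == '!':
--             escape = True
--         elif in_garbage:
--             if c == '>':
--                 in_garbage = False
--         elif c == '<':
--             in_garbage = True
--         elif c == '{':
--             level += 1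
--         elif c == '}':
--             result += level
--             level -= 1
--     return result
-- ===== Notes on version B (the rewrite author's own statement) =====
-- stated objective: simpler
-- what changed: Replaced A's multi-pass pipeline (repeated escape-stripping passes under a 'while' with string concatenation, then a garbage-removal pass, a comma replace, and a counting pass) with one single-pass state-machine loop over the characters maintaining escape/in_garbage/level/result.
import Mathlib
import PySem

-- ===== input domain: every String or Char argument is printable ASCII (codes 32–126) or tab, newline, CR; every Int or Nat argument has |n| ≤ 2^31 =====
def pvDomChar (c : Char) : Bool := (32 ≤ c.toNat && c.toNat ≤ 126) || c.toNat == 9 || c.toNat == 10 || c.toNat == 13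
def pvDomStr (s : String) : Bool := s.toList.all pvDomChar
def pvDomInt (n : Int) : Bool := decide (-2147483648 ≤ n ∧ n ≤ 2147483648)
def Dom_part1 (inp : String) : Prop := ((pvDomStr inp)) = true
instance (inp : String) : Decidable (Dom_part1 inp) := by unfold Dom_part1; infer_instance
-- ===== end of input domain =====

-- B replaces A's multi-pass pipeline (repeated escape-stripping passes, a garbage-removal pass,
-- a comma replace, then a counting pass) with one single-pass state machine; objective: simpler.

-- ===== PORT A =====
-- one pass of A's while-loop body: remove '!'-escapes, threading ignore_next
def pvStripPass : Bool → List Char → Bool × List Char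
  | ign, [] => (ign, [])
  | ign, c :: cs =>
    if ign then pvStripPass false cs
    else if c = '!' then pvStripPass true cs
    else
      let r := pvStripPass ign cs
      (r.1, c :: r.2)

-- Python's "'!' in s" as a plain membership (used by the termination argument)
theorem pvIsInBang_iff (cs : List Char) :
    PySem.Chars.isIn ['!'] cs = true ↔ '!' ∈ cs := by
  rw [PySem.Chars.isIn_iff_infix]
  constructor
  · intro h
    exact List.singleton_sublist.mp h.sublist
  · intro h
    obtain ⟨s, t, rfl⟩ := List.append_of_mem h
    exact ⟨s, t, by simp⟩

theorem pvStripPass_length_le (ign : Bool) (cs : List Char) :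
    (pvStripPass ign cs).2.length ≤ cs.length := by
  induction cs generalizing ign with
  | nil => simp [pvStripPass]
  | cons c cs ih =>
    simp only [pvStripPass]
    split_ifs with h1 h2
    · exact Nat.le_succ_of_le (ih false)
    · exact Nat.le_succ_of_le (ih true)
    · simpa using ih ign

theorem pvStripPass_length_lt (ign : Bool) (cs : List Char) (h : '!' ∈ cs) :
    (pvStripPass ign cs).2.length < cs.length := by
  induction cs generalizing ign with
  | nil => simp at h
  | cons c cs ih =>
    simp only [pvStripPass]
    split_ifs with h1 h2
    · exact Nat.lt_succ_of_le (pvStripPass_length_le false cs)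
    · exact Nat.lt_succ_of_le (pvStripPass_length_le true cs)
    · have hc : '!' ∈ cs := by
        rcases List.mem_cons.mp h with h' | h'
        · exact absurd h'.symm h2
        · exact h'
      simpa using ih ign hc

-- A's "while '!' in new_inp:" loop
def pvWhileStrip (ign : Bool) (cs : List Char) : List Char :=
  if _h : PySem.Chars.isIn ['!'] cs = true then
    let r := pvStripPass ign cs
    pvWhileStrip r.1 r.2
  else cs
termination_by cs.length
decreasing_by exact pvStripPass_length_lt ign cs ((pvIsInBang_iff cs).mp _h)

-- A's garbage-removal pass, threading in_garbage
def pvGarb : Bool → List Char → List Char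
  | _, [] => []
  | g, c :: cs =>
    if g then
      if c = '>' then pvGarb false cs else pvGarb true cs
    else
      if c = '<' then pvGarb true cs
      else c :: pvGarb false cs

-- A's inner sum_groups loop
def pvSumGroups : Int → Int → List Char → Int
  | _, result, [] => result
  | level, result, c :: cs =>
    if c = '{' then pvSumGroups (level + 1) result cs
    else if c = '}' then pvSumGroups (level - 1) (result + level) cs
    else pvSumGroups level result cs

def part1 (inp : String) : Int :=
  let stripped := pvWhileStrip false inp.toList
  let noGarb := pvGarb false stripped
  let clean := PySem.Chars.replace noGarb [','] []
  pvSumGroups 0 0 clean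

-- ===== PORT B =====
-- single state machine: escape, in_garbage, level, result
def pvBLoop : Bool → Bool → Int → Int → List Char → Int
  | _, _, _, result, [] => result
  | esc, gar, level, result, c :: cs =>
    if esc then pvBLoop false gar level result cs
    else if c = '!' then pvBLoop true gar level result cs
    else if gar then
      if c = '>' then pvBLoop false false level result cs
      else pvBLoop false true level result cs
    else if c = '<' then pvBLoop false true level result cs
    else if c = '{' then pvBLoop false gar (level + 1) result cs
    else if c = '}' then pvBLoop false gar (level - 1) (result + level) cs
    else pvBLoop false gar level result cs

def part1_alt (inp : String) : Int :=
  pvBLoop false false 0 0 inp.toList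

-- ===== PRECONDITION & SPEC =====
def Spec_part1 (inp : String) (out : Int) : Prop := out = part1_alt inp
instance (inp : String) (out : Int) : Decidable (Spec_part1 inp out) := by unfold Spec_part1; infer_instance

-- ===== CLAIM (what is proved, stated in full; the proofs are below) =====
def Claim_equal_part1 : Prop := ∀ (inp : String), Dom_part1 inp → Spec_part1 inp (part1 inp)

-- ===== LEMMAS AND PROOFS =====
-- commas are ignored by the counting loop
theorem pvSumGroups_filter_comma (cs : List Char) (level result : Int) :
    pvSumGroups level result (cs.filter (· != ',')) = pvSumGroups level result cs := by
  induction cs generalizing level result with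
  | nil => simp
  | cons c cs ih =>
    by_cases hc : c = ','
    · subst hc
      simp [pvSumGroups, ih]
    · simp only [List.filter_cons, bne_iff_ne, ne_eq, hc, not_false_eq_true,
        if_true, pvSumGroups]
      split_ifs <;> exact ih _ _

-- s.replace(',', '') removes exactly the commas
theorem pvReplaceGo_comma (fuel : Nat) (l acc : List Char) (h : l.length ≤ fuel) :
    PySem.Chars.replace.go [','] [] fuel l acc = acc.reverse ++ l.filter (· != ',') := by
  induction fuel generalizing l acc with
  | zero =>
    have : l = [] := List.length_eq_zero_iff.mp (Nat.le_zero.mp h)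
    subst this
    simp [PySem.Chars.replace.go]
  | succ fuel ih =>
    cases l with
    | nil => simp [PySem.Chars.replace.go]
    | cons c t =>
      by_cases hc : c = ','
      · subst hc
        rw [PySem.Chars.replace.go,
          if_pos (by simp [List.isPrefixOf] : List.isPrefixOf [','] (','::t) = true)]
        have hd : List.drop ([','] : List Char).length (','::t) = t := rfl
        rw [hd, ih t _ (by simpa using Nat.le_of_succ_le_succ h)]
        simp
      · rw [PySem.Chars.replace.go,
          if_neg (by
            simp only [List.isPrefixOf, Bool.and_true, beq_iff_eq]
            exact fun h' => hc h'.symm)]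
        rw [ih t (c :: acc) (by simpa using Nat.le_of_succ_le_succ h)]
        simp [hc]

theorem pvReplace_comma (l : List Char) :
    PySem.Chars.replace l [','] [] = l.filter (· != ',') := by
  rw [PySem.Chars.replace]
  simp only [List.isEmpty_cons, Bool.false_eq_true, if_false]
  exact pvReplaceGo_comma l.length l [] le_rfl

-- one strip pass leaves no '!'
theorem pvStripPass_no_bang (ign : Bool) (cs : List Char) :
    '!' ∉ (pvStripPass ign cs).2 := by
  induction cs generalizing ign with
  | nil => simp [pvStripPass]
  | cons c cs ih =>
    simp only [pvStripPass]
    split_ifs with h1 h2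
    · exact ih false
    · exact ih true
    · simp only [List.mem_cons, not_or]
      exact ⟨fun h => h2 h.symm, ih ign⟩

-- a '!'-free string is a fixed point of the strip pass (with ignore_next clear)
theorem pvStripPass_id (cs : List Char) (h : '!' ∉ cs) :
    pvStripPass false cs = (false, cs) := by
  induction cs with
  | nil => simp [pvStripPass]
  | cons c cs ih =>
    have hc : c ≠ '!' := fun hc => h (by simp [hc])
    have hcs : '!' ∉ cs := fun h' => h (by simp [h'])
    simp [pvStripPass, hc, ih hcs]

-- A's while loop is exactly one strip pass
theorem pvWhileStrip_eq (cs : List Char) :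
    pvWhileStrip false cs = (pvStripPass false cs).2 := by
  rw [pvWhileStrip]
  by_cases h : PySem.Chars.isIn ['!'] cs = true
  · rw [dif_pos h]
    show pvWhileStrip (pvStripPass false cs).1 (pvStripPass false cs).2 = _
    rw [pvWhileStrip, dif_neg]
    intro h'
    exact pvStripPass_no_bang _ cs ((pvIsInBang_iff _).mp h')
  · rw [dif_neg h]
    have : '!' ∉ cs := fun h' => h ((pvIsInBang_iff cs).mpr h')
    rw [pvStripPass_id cs this]

-- the main invariant: B's single pass equals A's strip-then-garbage-then-count pipeline
theorem pvMain (cs : List Char) (esc gar : Bool) (level result : Int) :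
    pvBLoop esc gar level result cs =
      pvSumGroups level result (pvGarb gar (pvStripPass esc cs).2) := by
  induction cs generalizing esc gar level result with
  | nil => simp [pvBLoop, pvStripPass, pvGarb, pvSumGroups]
  | cons c cs ih =>
    by_cases hesc : esc = true
    · subst hesc
      simp only [pvBLoop, pvStripPass, if_true]
      exact ih false gar level result
    · have hesc' : esc = false := by simpa using hesc
      subst hesc'
      by_cases hbang : c = '!'
      · subst hbang
        simp only [pvBLoop, pvStripPass, Bool.false_eq_true, if_false, if_true]
        exact ih true gar level result
      · simp only [pvBLoop, pvStripPass, Bool.false_eq_true, if_false, if_neg hbang]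
        by_cases hgar : gar = true
        · subst hgar
          by_cases hgt : c = '>'
          · simp only [hgt, pvGarb, if_true]
            exact ih false false level result
          · simp only [pvGarb, if_true, if_neg hgt]
            exact ih false true level result
        · have hgar' : gar = false := by simpa using hgar
          subst hgar'
          by_cases hlt : c = '<'
          · simp only [hlt, pvGarb, Bool.false_eq_true, if_false, if_true]
            exact ih false true level result
          · simp only [pvGarb, Bool.false_eq_true, if_false, if_neg hlt]
            by_cases hob : c = '{'
            · simp only [hob, pvSumGroups, if_true]
              exact ih false false (level + 1) result
            · by_cases hcb : c = '}'
              · simp only [hcb, pvSumGroups, if_neg (by decide : ¬('}' = '{')), if_true]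
                exact ih false false (level - 1) (result + level)
              · simp only [pvSumGroups, if_neg hob, if_neg hcb]
                exact ih false false level result

-- ===== VERDICT (by name: the statement is the Claim_ definition above) =====
theorem part1_spec : Claim_equal_part1 := by
  intro inp _
  unfold Spec_part1 part1 part1_alt
  simp only [pvWhileStrip_eq, pvReplace_comma, pvSumGroups_filter_comma, pvMain]
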